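-- pv_equiv track=rewrite | github.com/MagniControlProjects/SocialAutomation | SloganMaker/filterquotes.py | ValidateWordPresence
-- ===== SOURCE A (Python) =====
-- def ValidateWordPresence(
--
--         checkWord,
--         statement
--         ):
--
--     checkWord=checkWord.lower()
--     checkWord=checkWord.strip(",.?!'")
--     checkList = [
--         checkWord,
--         " %s "%checkWord,
--         " %s"%checkWord,
--         "%s "%checkWord,
--         "%ss"%checkWord,
--         "%sed"%checkWord,
--         "%sd"%checkWord,
--         "%sies"%checkWord,
--         "%ses"%checkWord,
--         ]
--     statement = statement.lower()
--     statement = statement.strip(",.?!'")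
--     statementWords = statement.split(" ")
--     Present = False
--     for keyword in statementWords:
--         for CheckItem in checkList:
--             if CheckItem == keyword:
--                 Present = True
--                 break
--     return Present
-- ===== SOURCE B (Python) =====
-- def ValidateWordPresence(checkWord, statement):
--     cw = checkWord.lower().strip(",.?!'")
--     suffixes = ("", "s", "ed", "d", "ies", "es")
--     for w in statement.lower().strip(",.?!'").split(" "):
--         if w.startswith(cw) and w[len(cw):] in suffixes:
--             return True
--     return False
-- ===== Notes on version B (the rewrite author's own statement) =====
-- stated objective: simpler
-- what changed: B never builds A's 9-variant candidate list: it tests each statement word directly by prefix-plus-suffix stripping (word starts with the normalised checkWord and the remainder is one of 6 suffixes), using the proved fact that split(' ') words contain no space, so A's three space-padded variants are dead; it also early-returns instead of A's run-to-completion flag loop.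
import Mathlib
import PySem

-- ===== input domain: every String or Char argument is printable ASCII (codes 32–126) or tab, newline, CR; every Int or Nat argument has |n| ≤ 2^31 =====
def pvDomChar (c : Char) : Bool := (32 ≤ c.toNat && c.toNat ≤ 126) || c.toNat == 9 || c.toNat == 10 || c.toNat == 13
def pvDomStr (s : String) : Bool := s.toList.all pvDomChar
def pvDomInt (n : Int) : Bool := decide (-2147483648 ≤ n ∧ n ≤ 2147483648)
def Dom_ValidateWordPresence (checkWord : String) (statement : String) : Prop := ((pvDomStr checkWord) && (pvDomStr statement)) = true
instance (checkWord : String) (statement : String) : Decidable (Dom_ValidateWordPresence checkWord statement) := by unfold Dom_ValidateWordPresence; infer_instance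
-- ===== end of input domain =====

-- B replaces A's generate-9-variants-and-compare scan by per-word suffix stripping: a word matches iff it
-- starts with the normalised checkWord and the rest is one of the 6 suffixes (split words never contain a
-- space, so A's 3 space-padded variants can never match) — simpler, no candidate list is built.

-- ===== PORT A =====
-- inner 'for CheckItem in checkList: if CheckItem == keyword: Present = True; break'
def pvInnerLoop (checkList : List String) (keyword : String) (present : Bool) : Bool :=
  match checkList with
  | [] => present
  | c :: rest => if c == keyword then true else pvInnerLoop rest keyword present

def ValidateWordPresence (checkWord : String) (statement : String) : Bool :=
  let cw := PySem.Str.stripChars (PySem.Str.lower checkWord) ",.?!'"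
  let checkList : List String := [cw, " " ++ cw ++ " ", " " ++ cw, cw ++ " ",
    cw ++ "s", cw ++ "ed", cw ++ "d", cw ++ "ies", cw ++ "es"]
  let st := PySem.Str.stripChars (PySem.Str.lower statement) ",.?!'"
  let statementWords := (PySem.Str.split? st " ").getD []
  statementWords.foldl (fun present keyword => pvInnerLoop checkList keyword present) false

-- ===== PORT B =====
def ValidateWordPresence_alt (checkWord : String) (statement : String) : Bool :=
  let cw := PySem.Str.stripChars (PySem.Str.lower checkWord) ",.?!'"
  let suffixes : List String := ["", "s", "ed", "d", "ies", "es"]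
  let ws := (PySem.Str.split? (PySem.Str.stripChars (PySem.Str.lower statement) ",.?!'") " ").getD []
  -- 'for w in ws: if cond: return True; return False' = ws.any cond
  ws.any (fun w => PySem.Str.startswith w cw
    && suffixes.contains (PySem.Str.slice w (some (PySem.Str.len cw)) none))

-- ===== PRECONDITION & SPEC =====
def Spec_ValidateWordPresence (checkWord : String) (statement : String) (out : Bool) : Prop := out = ValidateWordPresence_alt checkWord statement
instance (checkWord : String) (statement : String) (out : Bool) : Decidable (Spec_ValidateWordPresence checkWord statement out) := by unfold Spec_ValidateWordPresence; infer_instance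

-- ===== CLAIM (what is proved, stated in full; the proofs are below) =====
def Claim_equal_ValidateWordPresence : Prop := ∀ (checkWord : String) (statement : String), Dom_ValidateWordPresence checkWord statement → Spec_ValidateWordPresence checkWord statement (ValidateWordPresence checkWord statement)

-- ===== LEMMAS AND PROOFS =====
theorem pvInnerLoop_eq (cl : List String) (k : String) (p : Bool) :
    pvInnerLoop cl k p = (p || cl.any (fun c => c == k)) := by
  induction cl with
  | nil => simp [pvInnerLoop]
  | cons c rest ih =>
    simp only [pvInnerLoop, List.any_cons]
    by_cases h : c == k <;> simp [h, ih]

theorem pvFoldl_inner (cl : List String) (ws : List String) (b : Bool) :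
    ws.foldl (fun present keyword => pvInnerLoop cl keyword present) b
      = (b || ws.any (fun k => cl.any (fun c => c == k))) := by
  induction ws generalizing b with
  | nil => simp
  | cons w rest ih =>
    rw [List.foldl_cons, pvInnerLoop_eq, ih, List.any_cons, Bool.or_assoc]

-- every piece produced by split(" ") contains no space character
theorem pvGo_no_space (fuel : Nat) (l cur : List Char) (acc : List (List Char))
    (hl : l.length < fuel) (hacc : ∀ p ∈ acc, ' ' ∉ p) (hcur : ' ' ∉ cur) :
    ∀ p ∈ PySem.Chars.splitOn.go [' '] fuel l cur acc, ' ' ∉ p := by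
  induction fuel generalizing l cur acc with
  | zero => omega
  | succ n ih =>
    cases l with
    | nil =>
      intro p hp
      simp only [PySem.Chars.splitOn.go, List.mem_reverse, List.mem_cons] at hp
      rcases hp with h | h
      · subst h; simpa using hcur
      · exact hacc p h
    | cons c rest =>
      by_cases hc : c = ' '
      · subst hc
        have hpre : List.isPrefixOf [' '] (' ' :: rest) = true := by
          simp [List.isPrefixOf]
        simp only [PySem.Chars.splitOn.go, hpre, if_true]
        exact ih _ [] _ (by simpa using Nat.lt_of_succ_lt_succ hl)
          (by intro p hp
              rcases List.mem_cons.mp hp with h | h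
              · subst h; simpa using hcur
              · exact hacc p h)
          (by simp)
      · have hpre : List.isPrefixOf [' '] (c :: rest) = false := by
          simp [List.isPrefixOf, Ne.symm hc]
        simp only [PySem.Chars.splitOn.go, hpre, Bool.false_eq_true, if_false]
        exact ih rest (c :: cur) acc (by simpa using Nat.lt_of_succ_lt_succ hl) hacc
          (by intro h
              rcases List.mem_cons.mp h with h | h
              · exact hc h.symm
              · exact hcur h)

theorem pv_split_eq (s : String) :
    (PySem.Str.split? s " ").getD []
      = (PySem.Chars.splitOn s.toList [' ']).map String.ofList := rfl

theorem pv_split_no_space (s : String) :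
    ∀ w ∈ (PySem.Str.split? s " ").getD [], ' ' ∉ w.toList := by
  intro w hw
  rw [pv_split_eq] at hw
  rcases List.mem_map.mp hw with ⟨p, hp, rfl⟩
  have hnp : ' ' ∉ p :=
    pvGo_no_space (s.toList.length + 1) s.toList [] [] (by omega)
      (by intro q hq; cases hq) (by simp) p
      (by simpa [PySem.Chars.splitOn] using hp)
  simpa using hnp

-- the per-word condition: for a word without spaces, matching one of A's 9 variants
-- is exactly B's prefix-plus-suffix test
theorem pv_word_cond (cw w : String) (hw : ' ' ∉ w.toList) :
    ([cw, " " ++ cw ++ " ", " " ++ cw, cw ++ " ",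
      cw ++ "s", cw ++ "ed", cw ++ "d", cw ++ "ies", cw ++ "es"].any (fun c => c == w))
    = (PySem.Str.startswith w cw
        && (["", "s", "ed", "d", "ies", "es"] : List String).contains
             (PySem.Str.slice w (some (PySem.Str.len cw)) none)) := by
  rw [Bool.eq_iff_iff]
  have hsp : (" " : String).toList = [' '] := rfl
  have hsw : PySem.Str.startswith w cw = true ↔ cw.toList <+: w.toList := by
    simp [PySem.Chars.startswith_iff]
  have hlen : PySem.Str.len cw = ((cw.toList.length : Nat) : Int) := by simp
  have hslice : (PySem.Str.slice w (some (PySem.Str.len cw)) none).toList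
      = w.toList.drop cw.toList.length := by
    rw [hlen]; simp [PySem.List.slice_from]
  constructor
  · intro h
    simp only [List.any_cons, List.any_nil, Bool.or_eq_true, beq_iff_eq,
      Bool.false_eq_true, or_false, ← String.toList_inj, String.toList_append, hsp] at h
    -- the three space-padded variants cannot equal a space-free word
    rcases h with h | h | h | h | h | h | h | h | h
    all_goals first
    | (refine absurd ?_ hw; rw [← h]; simp; done)
    | {
      refine (Bool.and_eq_true _ _).mpr ⟨hsw.mpr ?_, ?_⟩
      · rw [← h]
        all_goals exact ⟨_, rfl⟩
      · simp only [List.contains_iff_mem, List.mem_cons, List.not_mem_nil, or_false,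
          ← String.toList_inj, hslice, ← h, List.drop_left, List.drop_length]
        simp }
  · intro h
    rcases (Bool.and_eq_true _ _).mp h with ⟨h1, h2⟩
    have hpre : cw.toList <+: w.toList := hsw.mp h1
    have hw_eq : w.toList = cw.toList ++ w.toList.drop cw.toList.length := by
      conv_lhs => rw [← List.take_append_drop cw.toList.length w.toList]
      rw [← List.prefix_iff_eq_take.mp hpre]
    simp only [List.contains_iff_mem, List.mem_cons, List.not_mem_nil, or_false,
      ← String.toList_inj, hslice] at h2
    simp only [List.any_cons, List.any_nil, Bool.or_eq_true, beq_iff_eq,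
      Bool.false_eq_true, or_false, ← String.toList_inj, String.toList_append, hsp]
    rcases h2 with h2 | h2 | h2 | h2 | h2 | h2
    · exact Or.inl (by rw [hw_eq, h2]; simp)
    · exact Or.inr (Or.inr (Or.inr (Or.inr (Or.inl (by rw [hw_eq, h2])))))
    · exact Or.inr (Or.inr (Or.inr (Or.inr (Or.inr (Or.inl (by rw [hw_eq, h2]))))))
    · exact Or.inr (Or.inr (Or.inr (Or.inr (Or.inr (Or.inr (Or.inl (by rw [hw_eq, h2])))))))
    · exact Or.inr (Or.inr (Or.inr (Or.inr (Or.inr (Or.inr (Or.inr (Or.inl (by rw [hw_eq, h2]))))))))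
    · exact Or.inr (Or.inr (Or.inr (Or.inr (Or.inr (Or.inr (Or.inr (Or.inr (by rw [hw_eq, h2]))))))))

-- ===== VERDICT (by name: the statement is the Claim_ definition above) =====
theorem ValidateWordPresence_spec : Claim_equal_ValidateWordPresence := by
  intro checkWord statement _
  unfold Spec_ValidateWordPresence
  simp only [ValidateWordPresence, ValidateWordPresence_alt]
  rw [pvFoldl_inner, Bool.false_or]
  exact PySem.List.any_congr_mem (fun w hwmem =>
    pv_word_cond _ w (pv_split_no_space _ w hwmem))
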